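-- pv_equiv track=rewrite | github.com/djdjz7/dsa-b-2025-spring | routine/0527-resulting-string-after-adjacent-removals.py | resultingString
-- ===== SOURCE A (Python) =====
-- def resultingString(s: str) -> str:
--     def is_adjacent(a, b):
--         if a == "a" and b == "z" or a == "z" and b == "a":
--             return True
--         return abs(ord(a) - ord(b)) == 1
--
--     stack = []
--     for ch in s:
--         if stack and is_adjacent(stack[-1], ch):
--             stack.pop()
--             continue
--         stack.append(ch)
--     return "".join(stack)
-- ===== SOURCE B (Python) =====
-- def resultingString(s: str) -> str:
--     def is_adjacent(a, b):
--         if a == "a" and b == "z" or a == "z" and b == "a":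
--             return True
--         return abs(ord(a) - ord(b)) == 1
--
--     while True:
--         found = -1
--         for i in range(len(s) - 1):
--             if is_adjacent(s[i], s[i + 1]):
--                 found = i
--                 break
--         if found == -1:
--             return s
--         s = s[:found] + s[found + 2:]
-- ===== Notes on version B (the rewrite author's own statement) =====
-- stated objective: alternative
-- what changed: Replaced the single left-to-right stack pass with a fixpoint loop that repeatedly finds and removes the leftmost adjacent pair and rescans until no pair remains.
import Mathlib
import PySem

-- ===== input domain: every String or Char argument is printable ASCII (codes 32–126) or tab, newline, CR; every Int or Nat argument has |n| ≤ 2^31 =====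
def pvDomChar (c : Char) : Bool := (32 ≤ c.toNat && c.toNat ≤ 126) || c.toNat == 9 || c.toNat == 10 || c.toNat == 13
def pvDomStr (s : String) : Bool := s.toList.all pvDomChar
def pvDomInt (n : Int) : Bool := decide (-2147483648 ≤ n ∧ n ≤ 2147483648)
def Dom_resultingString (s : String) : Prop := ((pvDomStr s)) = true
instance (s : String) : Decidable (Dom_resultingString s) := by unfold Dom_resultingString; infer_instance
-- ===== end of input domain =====

-- B replaces A's single stack pass by repeated removal of the leftmost adjacent pair until none remains
-- (alternative decomposition, same exact result; not faster).

-- ===== PORT A =====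
-- is_adjacent, branch for branch
def pyAdj (a b : Char) : Bool :=
  if (a = 'a' && b = 'z') || (a = 'z' && b = 'a') then true
  else ((a.toNat : Int) - (b.toNat : Int)).natAbs == 1

-- loop body: if stack and is_adjacent(stack[-1], ch): pop else append
def stepA (stack : List Char) (ch : Char) : List Char :=
  match stack.getLast? with
  | some t => if pyAdj t ch then stack.dropLast else stack ++ [ch]
  | none => stack ++ [ch]

def resultingString (s : String) : String :=
  String.mk (s.toList.foldl stepA [])

-- ===== PORT B =====
-- the inner for-loop of Source B: find the first adjacent pair and remove it (none = no pair found)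
def removeFirst : List Char → Option (List Char)
  | a :: b :: rest =>
      if pyAdj a b then some rest
      else (removeFirst (b :: rest)).map (a :: ·)
  | _ => none

-- termination measure for the while-loop (cited by collapse's decreasing_by)
theorem removeFirst_length : ∀ (xs ys : List Char), removeFirst xs = some ys → ys.length + 2 = xs.length := by
  intro xs
  induction xs with
  | nil => intro ys h; simp [removeFirst] at h
  | cons a tl ih =>
    cases tl with
    | nil => intro ys h; simp [removeFirst] at h
    | cons b rest =>
      intro ys h
      rw [removeFirst] at h
      by_cases hab : pyAdj a b = true
      · simp [hab] at h; simp [← h]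
      · simp [hab] at h
        obtain ⟨ys', h1, h2⟩ := h
        have := ih ys' h1
        simp [← h2]
        simp at this
        omega

-- the while-loop of Source B
def collapse (xs : List Char) : List Char :=
  match h : removeFirst xs with
  | some ys => collapse ys
  | none => xs
termination_by xs.length
decreasing_by
  have := removeFirst_length xs ys h
  omega

def resultingString_alt (s : String) : String :=
  String.mk (collapse s.toList)

-- ===== PRECONDITION & SPEC =====
def Spec_resultingString (s : String) (out : String) : Prop := out = resultingString_alt s
instance (s : String) (out : String) : Decidable (Spec_resultingString s out) := by unfold Spec_resultingString; infer_instance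

-- ===== CLAIM (what is proved, stated in full; the proofs are below) =====
def Claim_equal_resultingString : Prop := ∀ (s : String), Dom_resultingString s → Spec_resultingString s (resultingString s)

-- ===== LEMMAS AND PROOFS =====

-- a list with no adjacent consecutive pair passes through the stack unchanged
theorem chain_foldl (u : List Char) (h : List.IsChain (fun a b => pyAdj a b = false) u) :
    List.foldl stepA [] u = u := by
  induction u using List.reverseRecOn with
  | nil => rfl
  | append_singleton u c ih =>
    obtain ⟨h1, _, h3⟩ := List.isChain_append.mp h
    rw [List.foldl_append, ih h1]
    unfold stepA
    cases hu : u.getLast? with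
    | none => simp [hu]
    | some t =>
      have ht : pyAdj t c = false := h3 t (by simp [hu]) c (by simp)
      simp [hu, ht]

-- removing the leftmost adjacent pair does not change the stack result
theorem fold_remove (u v : List Char) (a b : Char)
    (hc : List.IsChain (fun x y => pyAdj x y = false) (u ++ [a])) (hab : pyAdj a b = true) :
    List.foldl stepA [] (u ++ a :: b :: v) = List.foldl stepA [] (u ++ v) := by
  have hu : List.IsChain (fun x y => pyAdj x y = false) u := (List.isChain_append.mp hc).1
  have h1 : List.foldl stepA [] (u ++ [a]) = u ++ [a] := chain_foldl _ hc
  have h2 : List.foldl stepA [] u = u := chain_foldl _ hu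
  have hsplit : u ++ a :: b :: v = (u ++ [a]) ++ (b :: v) := by simp
  rw [hsplit, List.foldl_append, h1, List.foldl_append, h2]
  show List.foldl stepA (stepA (u ++ [a]) b) v = List.foldl stepA u v
  have : stepA (u ++ [a]) b = u := by
    unfold stepA
    simp [hab]
  rw [this]

-- characterisation of a successful scan: leftmost adjacent pair
theorem removeFirst_some : ∀ (xs ys : List Char), removeFirst xs = some ys →
    ∃ u a b v, xs = u ++ a :: b :: v ∧ pyAdj a b = true ∧
      List.IsChain (fun x y => pyAdj x y = false) (u ++ [a]) ∧ ys = u ++ v := by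
  intro xs
  induction xs with
  | nil => intro ys h; simp [removeFirst] at h
  | cons a tl ih =>
    cases tl with
    | nil => intro ys h; simp [removeFirst] at h
    | cons b rest =>
      intro ys h
      rw [removeFirst] at h
      by_cases hab : pyAdj a b = true
      · simp [hab] at h
        exact ⟨[], a, b, rest, rfl, hab, List.IsChain.singleton _, h.symm⟩
      · simp [hab] at h
        obtain ⟨ys', h1, h2⟩ := h
        obtain ⟨u, a', b', v, heq, hadj, hch, rfl⟩ := ih ys' h1
        refine ⟨a :: u, a', b', v, by simp [heq], hadj, ?_, by simp [← h2]⟩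
        have hhead : (u ++ [a']).head? = some b := by
          cases u with
          | nil => simp at heq; simp [heq.1]
          | cons c u' => simp at heq ⊢; exact heq.1.symm
        rw [show (a :: u) ++ [a'] = a :: (u ++ [a']) from rfl, List.isChain_cons]
        refine ⟨?_, hch⟩
        intro y hy
        rw [hhead] at hy
        simp at hy
        subst hy
        simpa using hab

-- a failed scan means no adjacent consecutive pair anywhere
theorem removeFirst_none : ∀ (xs : List Char), removeFirst xs = none →
    List.IsChain (fun x y => pyAdj x y = false) xs := by
  intro xs
  induction xs with
  | nil => intro _; exact List.IsChain.nil
  | cons a tl ih =>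
    cases tl with
    | nil => intro _; exact List.IsChain.singleton _
    | cons b rest =>
      intro h
      rw [removeFirst] at h
      by_cases hab : pyAdj a b = true
      · simp [hab] at h
      · simp [hab] at h
        have := ih h
        rw [List.isChain_cons]
        exact ⟨by intro y hy; simp at hy; subst hy; simpa using hab, this⟩

-- the stack pass computes the fixpoint of leftmost-pair removal
theorem fold_eq_collapse (xs : List Char) : List.foldl stepA [] xs = collapse xs := by
  rw [collapse]
  split
  · next ys h =>
    have hlt : ys.length < xs.length := by
      have := removeFirst_length xs ys h; omega
    obtain ⟨u, a, b, v, hxs, hab, hch, hys⟩ := removeFirst_some xs ys h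
    rw [hxs, fold_remove u v a b hch hab, ← hys, fold_eq_collapse ys]
  · next h => exact chain_foldl _ (removeFirst_none _ h)
termination_by xs.length
decreasing_by
  exact hlt

-- ===== VERDICT (by name: the statement is the Claim_ definition above) =====
theorem resultingString_spec : Claim_equal_resultingString := by
  intro s _
  unfold Spec_resultingString resultingString resultingString_alt
  rw [fold_eq_collapse]
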